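-- pv_equiv track=rewrite | github.com/yuanxu-li/careercup | chapter16-moderate/16.11.py | all_possible_lengths
-- ===== SOURCE A (Python) =====
-- def all_possible_lengths(a, b, k):
-- 	"""
-- 	a: shorter length
-- 	b: longer length
-- 	k: number of planks of wood
-- 	each time we change a plank of wood of shorter length for one of longer length, the length of
-- 	diving board changes by the difference of the shorter length and the longer length. Therefore,
-- 	we can count from the situation of all shorter lengths, change one shorter plank for a longer one,
-- 	until all are planks of longer length.
-- 	>>> all_possible_lengths(3, 8, 30)
-- 	[90, 95, 100, 105, 110, 115, 120, 125, 130, 135, 140, 145, 150, 155, 160, 165, 170, 175, 180, 185, 190, 195, 200, 205, 210, 215, 220, 225, 230, 235, 240]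
-- 	>>> all_possible_lengths(3, 6, 4)
-- 	[12, 15, 18, 21, 24]
-- 	"""
-- 	lengths = []
-- 	cur = a * k
-- 	lengths.append(cur)
-- 	diff = b - a
-- 	for i in range(k):
-- 		cur += diff
-- 		lengths.append(cur)
-- 	return lengths
-- ===== SOURCE B (Python) =====
-- def all_possible_lengths(a, b, k):
--     lengths = []
--     longer = k
--     while longer >= 0:
--         lengths.append(a * (k - longer) + b * longer)
--         longer -= 1
--     lengths.reverse()
--     return lengths
-- ===== Notes on version B (the rewrite author's own statement) =====
-- stated objective: alternative
-- what changed: B counts down over the number of longer planks, computing each board length directly from the plank counts a*(k-longer)+b*longer, building the list from the all-longer end and reversing it, instead of A's forward loop carrying a running sum cur += (b-a); Pre_ restricts to nonnegative plank counts, the task's natural domain, where for negative k A still returns the single seed value [a*k] while B returns no lengths.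
-- outside the precondition, e.g. on all_possible_lengths(3, 8, -2): A returns [-6], B returns []
import Mathlib
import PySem

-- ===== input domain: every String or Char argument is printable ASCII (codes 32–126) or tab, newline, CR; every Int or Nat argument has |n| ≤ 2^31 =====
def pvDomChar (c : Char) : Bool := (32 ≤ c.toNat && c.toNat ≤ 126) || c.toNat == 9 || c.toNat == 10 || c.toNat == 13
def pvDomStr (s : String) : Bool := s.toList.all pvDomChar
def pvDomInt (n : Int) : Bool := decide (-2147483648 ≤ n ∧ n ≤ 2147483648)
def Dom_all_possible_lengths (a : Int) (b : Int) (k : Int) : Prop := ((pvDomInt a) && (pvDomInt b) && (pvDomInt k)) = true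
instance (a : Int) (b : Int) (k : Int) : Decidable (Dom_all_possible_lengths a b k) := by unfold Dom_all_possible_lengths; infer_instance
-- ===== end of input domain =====

-- B counts down over the number of longer planks, deriving each length from the plank counts
-- and reversing at the end, instead of A's forward running-sum loop; objective: alternative.

-- ===== PORT A =====
-- literal port of A: lengths = [a*k]; for i in range(k): cur += diff; lengths.append(cur)
def all_possible_lengths (a : Int) (b : Int) (k : Int) : List Int :=
  let cur := a * k
  let lengths : List Int := [cur]
  let diff := b - a
  let st := (PySem.List.pyRange 0 k 1).foldl
    (fun (st : List Int × Int) _ =>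
      let cur := st.2 + diff
      (st.1 ++ [cur], cur))
    (lengths, cur)
  st.1

-- ===== PORT B =====
-- literal port of B's while loop: append a*(k-longer)+b*longer while longer >= 0, then reverse
def pvLoopB (a : Int) (b : Int) (k : Int) (lengths : List Int) (longer : Int) : List Int :=
  if 0 ≤ longer then
    pvLoopB a b k (lengths ++ [a * (k - longer) + b * longer]) (longer - 1)
  else lengths
termination_by (longer + 1).toNat
decreasing_by omega

def all_possible_lengths_alt (a : Int) (b : Int) (k : Int) : List Int :=
  (pvLoopB a b k [] k).reverse

-- ===== PRECONDITION & SPEC =====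
-- Pre_ restricts to nonnegative plank counts, the task's natural domain; for negative k
-- A still returns the single seed value [a*k] while B returns no lengths.
def Pre_all_possible_lengths (a : Int) (b : Int) (k : Int) : Prop := 0 ≤ k
instance (a : Int) (b : Int) (k : Int) : Decidable (Pre_all_possible_lengths a b k) := by unfold Pre_all_possible_lengths; infer_instance
def pvWitness_all_possible_lengths : Int × Int × Int := (3, 8, 2)

def Spec_all_possible_lengths (a : Int) (b : Int) (k : Int) (out : List Int) : Prop := out = all_possible_lengths_alt a b k
instance (a : Int) (b : Int) (k : Int) (out : List Int) : Decidable (Spec_all_possible_lengths a b k out) := by unfold Spec_all_possible_lengths; infer_instance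

-- ===== CLAIM (what is proved, stated in full; the proofs are below) =====
def Claim_equal_all_possible_lengths : Prop := ∀ (a : Int) (b : Int) (k : Int), Dom_all_possible_lengths a b k → Pre_all_possible_lengths a b k → Spec_all_possible_lengths a b k (all_possible_lengths a b k)

-- ===== LEMMAS AND PROOFS =====

-- A's loop over a length-n list, started at (acc, c), appends c + (j+1)*diff for j < n.
theorem pv_foldA (diff : Int) (xs : List Int) (acc : List Int) (c : Int) :
    (xs.foldl (fun (st : List Int × Int) _ =>
        (st.1 ++ [st.2 + diff], st.2 + diff)) (acc, c))
    = (acc ++ (List.range xs.length).map (fun j : Nat => c + ((j : Int) + 1) * diff),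
       c + (xs.length : Int) * diff) := by
  induction xs generalizing acc c with
  | nil => simp
  | cons x xs ih =>
    simp only [List.foldl_cons, ih, List.length_cons, Prod.mk.injEq]
    refine ⟨?_, by push_cast; ring⟩
    rw [List.append_assoc]
    congr 1
    rw [List.range_succ_eq_map]
    simp only [List.map_cons, List.map_map, List.cons_append, List.nil_append,
      Function.comp_def]
    congr 1
    · push_cast; ring
    · apply List.map_congr_left
      intro j _
      push_cast
      ring

-- B's loop started at longer = n appends the terms for n, n-1, …, 0 in that order.
theorem pv_loopB_spec (a b k : Int) (n : Nat) : ∀ (acc : List Int),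
    pvLoopB a b k acc (n : Int)
      = acc ++ (List.range (n + 1)).map
          (fun i : Nat => a * (k - ((n : Int) - (i : Int))) + b * ((n : Int) - (i : Int))) := by
  induction n with
  | zero =>
    intro acc
    rw [pvLoopB]
    simp only [Int.ofNat_zero, le_refl, if_pos]
    rw [pvLoopB]
    norm_num
  | succ m ih =>
    intro acc
    rw [pvLoopB]
    have h0 : (0 : Int) ≤ ((m + 1 : Nat) : Int) := by positivity
    rw [if_pos h0]
    have hcast : ((m + 1 : Nat) : Int) - 1 = (m : Int) := by push_cast; ring
    rw [hcast, ih]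
    rw [List.append_assoc]
    congr 1
    rw [show List.range (m + 1 + 1) = 0 :: (List.range (m + 1)).map Nat.succ from
      List.range_succ_eq_map]
    simp only [List.map_cons, List.map_map, List.singleton_append, Function.comp_def,
      Nat.succ_eq_add_one, List.cons.injEq]
    refine ⟨by push_cast; ring, List.map_congr_left fun j _ => by push_cast; ring⟩

theorem all_possible_lengths_eq_alt (a b k : Int) (hk : 0 ≤ k) :
    all_possible_lengths a b k = all_possible_lengths_alt a b k := by
  obtain ⟨n, rfl⟩ : ∃ n : Nat, k = (n : Int) := ⟨k.toNat, (Int.toNat_of_nonneg hk).symm⟩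
  unfold all_possible_lengths all_possible_lengths_alt
  simp only [PySem.List.pyRange_one]
  rw [pv_foldA, pv_loopB_spec]
  simp only [List.nil_append, List.singleton_append, List.length_map, List.length_range]
  rw [show ((n : Int) - 0).toNat = n from by omega]
  apply List.ext_getElem
  · simp
  · intro i h1 h2
    have hn1 : i < n + 1 := by simpa using h1
    simp only [List.getElem_reverse, List.length_map, List.length_range]
    rcases i with _ | j
    · simp only [List.getElem_cons_zero, List.getElem_map, List.getElem_range]
      rw [show n + 1 - 1 - 0 = n from by omega]
      ring
    · simp only [List.getElem_cons_succ, List.getElem_map, List.getElem_range]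
      have hj : j < n := by omega
      rw [show n + 1 - 1 - (j + 1) = n - (j + 1) from by omega]
      have hcast : ((n : Int) - ((n - (j + 1) : Nat) : Int)) = (j : Int) + 1 := by omega
      rw [hcast]
      ring

-- ===== VERDICT (by name: the statement is the Claim_ definition above) =====
theorem all_possible_lengths_spec : Claim_equal_all_possible_lengths := by
  intro a b k _ hk
  exact all_possible_lengths_eq_alt a b k hk
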